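-- pv_equiv track=rewrite | github.com/huseyinkoclar/lexical-analyzer | lexicalanalyzer.py | check
-- ===== SOURCE A (Python) =====
-- operators = ["/*", "*/", "++","-","*","/","+","--","==", "<", ">", "<=",">=", "=", "(", ")", "{", "}"]
--
-- def check(word): #checks if the word is a keyword or an operator
--     stack = []
--     if word == '//':
--         stack.append("Comment")
--         return stack
--     for operator in operators:
--         if operator in word:
--             words = word.split(operator)
--             stack.append(words[1])
--             stack.append(operator)
--             array = check(words[0])
--             for i in array:
--                 stack.append(i)
--             break
--     if not stack:
--         stack.append(word)
--     return stack
-- ===== SOURCE B (Python) =====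
-- operators = ["/*", "*/", "++","-","*","/","+","--","==", "<", ">", "<=",">=", "=", "(", ")", "{", "}"]
--
-- def check(word):
--     # Stage 1: collect (right-segment, operator) steps and the final tail token.
--     steps = []
--     tail = None
--     while tail is None:
--         if word == '//':
--             tail = ['Comment']
--         else:
--             found = [op for op in operators if op in word]
--             if not found:
--                 tail = [word]
--             else:
--                 parts = word.split(found[0])
--                 steps.append((parts[1], found[0]))
--                 word = parts[0]
--     # Stage 2: flatten the steps and attach the tail.
--     return [tok for pair in steps for tok in pair] + tail
-- ===== Notes on version B (the rewrite author's own statement) =====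
-- stated objective: alternative
-- what changed: A's recursion is replaced by a staged iteration: a loop first collects (right-segment, operator) pairs and a tail token, choosing each operator as the head of a filter over the operator table, and a second pass flattens the pairs into the token stack.
import Mathlib
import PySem

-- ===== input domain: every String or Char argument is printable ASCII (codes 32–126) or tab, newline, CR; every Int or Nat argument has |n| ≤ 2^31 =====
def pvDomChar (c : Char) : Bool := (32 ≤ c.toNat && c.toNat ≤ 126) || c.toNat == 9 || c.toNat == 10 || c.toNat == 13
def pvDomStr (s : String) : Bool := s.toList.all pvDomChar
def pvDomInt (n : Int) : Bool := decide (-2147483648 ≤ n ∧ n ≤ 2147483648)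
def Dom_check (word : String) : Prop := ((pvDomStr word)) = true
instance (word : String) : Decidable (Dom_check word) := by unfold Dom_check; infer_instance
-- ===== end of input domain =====

-- B replaces A's recursion by a staged iteration: collect (right-segment, operator) pairs plus a
-- tail token, then flatten; same cost (objective: alternative).

def operators : List String := ["/*", "*/", "++","-","*","/","+","--","==", "<", ">", "<=",">=", "=", "(", ")", "{", "}"]

-- Hand port of Python's word.split(sep) for a NON-EMPTY sep (all entries of `operators` are non-empty):
-- exact Python semantics (leftmost, non-overlapping occurrences); written by hand because PySem.Str.split?
-- is not evaluable in reasonable time under #eval. Fuel = length + 1 suffices: each step consumes >= 1 char.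
def splitChFuel (fuel : Nat) (sep : List Char) (s : List Char) : List (List Char) :=
  match fuel with
  | 0 => [s]
  | fuel + 1 =>
    match s with
    | [] => [[]]
    | c :: rest =>
      if sep <+: (c :: rest) then [] :: splitChFuel fuel sep ((c :: rest).drop sep.length)
      else
        match splitChFuel fuel sep rest with
        | [] => [[c]]
        | l :: ls => (c :: l) :: ls

def pySplit (s sep : String) : List String :=
  (splitChFuel (s.length + 1) sep.toList s.toList).map (fun cs => String.mk cs)

-- ===== PORT A =====
-- A's recursion: the for-loop with break is the first operator contained in word (found, else the
-- 'if not stack' fallback). Fuel = word-length + 1 bounds the recursion depth: each recursive call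
-- goes to words[0], strictly shorter than word since the (non-empty) operator occurs in it.
def checkFuel (fuel : Nat) (word : String) : List String :=
  match fuel with
  | 0 => []
  | fuel + 1 =>
    if word = "//" then ["Comment"]
    else
      match operators.find? (fun op => PySem.Str.isIn op word) with
      | none => [word]
      | some op =>
        let ws := pySplit word op
        PySem.List.pyGetD ws 1 "" :: op :: checkFuel fuel (PySem.List.pyGetD ws 0 "")

def check (word : String) : List String := checkFuel (word.length + 1) word

-- ===== PORT B =====
-- Stage 1 of B: the while-loop collecting the (parts[1], op) pairs into `steps` and ending with the
-- tail token list; the operator is the head of the filtered operator table.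
def collectSteps (fuel : Nat) (word : String) (steps : List (String × String)) :
    List (String × String) × List String :=
  match fuel with
  | 0 => (steps, [])
  | fuel + 1 =>
    if word = "//" then (steps, ["Comment"])
    else
      match (operators.filter (fun op => PySem.Str.isIn op word)).head? with
      | none => (steps, [word])
      | some op =>
        let parts := pySplit word op
        collectSteps fuel (PySem.List.pyGetD parts 0 "")
          (steps ++ [(PySem.List.pyGetD parts 1 "", op)])

-- Stage 2 of B: flatten the pairs and attach the tail.
def check_alt (word : String) : List String :=
  let st := collectSteps (word.length + 1) word []
  (st.1.flatMap (fun p => [p.1, p.2])) ++ st.2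

-- ===== PRECONDITION & SPEC =====
def Spec_check (word : String) (out : List String) : Prop := out = check_alt word
instance (word : String) (out : List String) : Decidable (Spec_check word out) := by unfold Spec_check; infer_instance

-- ===== CLAIM (what is proved, stated in full; the proofs are below) =====
def Claim_equal_check : Prop := ∀ (word : String), Dom_check word → Spec_check word (check word)

-- ===== LEMMAS AND PROOFS =====
theorem head?_filter_eq_find? (p : String → Bool) (l : List String) :
    (l.filter p).head? = l.find? p := by
  induction l with
  | nil => rfl
  | cons a t ih => by_cases h : p a <;> simp [h, ih]

theorem collectSteps_flatten (fuel : Nat) : ∀ (word : String) (steps : List (String × String)),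
    ((collectSteps fuel word steps).1.flatMap (fun p => [p.1, p.2])) ++ (collectSteps fuel word steps).2
      = (steps.flatMap (fun p => [p.1, p.2])) ++ checkFuel fuel word := by
  induction fuel with
  | zero => intro word steps; simp [collectSteps, checkFuel]
  | succ n ih =>
    intro word steps
    simp only [collectSteps, checkFuel, head?_filter_eq_find?]
    split
    · rfl
    · cases h : operators.find? (fun op => PySem.Str.isIn op word) with
      | none => rfl
      | some op => simp [ih, List.flatMap_append]

-- ===== VERDICT (by name: the statement is the Claim_ definition above) =====
theorem check_spec : Claim_equal_check := by
  intro word _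
  unfold Spec_check check check_alt
  rw [collectSteps_flatten]
  rfl
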